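-- pv_equiv track=rewrite | github.com/madhurparwal-grt1/Automation_jager | automation_script/docker_healing.py | is_non_apt_library
-- ===== SOURCE A (Python) =====
-- from typing import Optional, Dict, Any, List, Tuple
--
-- NON_APT_LIBRARIES = {
--     # Nix package manager libraries - require Nix to be installed
--     'nix-flake-c': 'nix',
--     'nix-cmd-c': 'nix',
--     'nix-fetchers-c': 'nix',
--     'nix-main-c': 'nix',
--     'nix-store-c': 'nix',
--     'nix-expr-c': 'nix',
--     'nixflake': 'nix',
--     'nixcmd': 'nix',
--     'nixfetchers': 'nix',
--     'nixmainc': 'nix',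
--     'nixstore': 'nix',
--     'nixexpr': 'nix',
-- }
--
-- def is_non_apt_library(library_name: str) -> Optional[str]:
--     """
--     Check if a library requires a non-apt package manager (like Nix).
--
--     Args:
--         library_name: pkg-config library name (e.g., 'nix-flake-c')
--
--     Returns:
--         The required package manager name (e.g., 'nix') if not apt-compatible, None otherwise
--     """
--     # Normalize the library name for comparison
--     normalized = library_name.lower().replace('-', '').replace('_', '')
--
--     for lib_pattern, pkg_manager in NON_APT_LIBRARIES.items():
--         pattern_normalized = lib_pattern.lower().replace('-', '').replace('_', '')
--         if normalized == pattern_normalized or normalized.startswith(pattern_normalized.rstrip('c')):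
--             return pkg_manager
--
--     # Check without 'lib' prefix
--     if library_name.startswith('lib'):
--         return is_non_apt_library(library_name[3:])
--
--     return None
-- ===== SOURCE B (Python) =====
-- from typing import Optional
--
-- # All entries in A's table map to 'nix', and every pattern's equality test is subsumed by the
-- # startswith test on its 'c'-stripped form, so the whole table collapses to six prefixes.
-- _NIX_PREFIXES = ('nixflake', 'nixcmd', 'nixfetchers', 'nixmain', 'nixstore', 'nixexpr')
--
-- def is_non_apt_library(library_name: str) -> Optional[str]:
--     name = library_name
--     while True:
--         normalized = name.lower().replace('-', '').replace('_', '')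
--         if any(normalized.startswith(p) for p in _NIX_PREFIXES):
--             return 'nix'
--         if name.startswith('lib'):
--             name = name[3:]
--         else:
--             return None
-- ===== Notes on version B (the rewrite author's own statement) =====
-- stated objective: simpler
-- what changed: B collapses A's 12-entry dict scan with per-pattern lower/replace/rstrip normalization into a fixed six-prefix startswith test (every table value is the same manager name and each equality test is subsumed by the startswith on its stripped form), and replaces A's recursion on the prefix-stripped name with an iterative while loop.
import Mathlib
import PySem

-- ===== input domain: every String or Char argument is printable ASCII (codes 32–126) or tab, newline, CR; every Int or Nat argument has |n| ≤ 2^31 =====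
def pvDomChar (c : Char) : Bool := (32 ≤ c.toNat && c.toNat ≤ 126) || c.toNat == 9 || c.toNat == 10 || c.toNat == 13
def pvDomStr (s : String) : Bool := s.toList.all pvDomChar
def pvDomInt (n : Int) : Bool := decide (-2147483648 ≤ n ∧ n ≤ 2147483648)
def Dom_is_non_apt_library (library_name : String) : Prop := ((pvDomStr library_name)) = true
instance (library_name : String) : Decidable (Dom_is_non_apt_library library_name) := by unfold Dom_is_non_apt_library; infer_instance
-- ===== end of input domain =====

-- B replaces A's per-pattern normalize/table scan and recursion with a six-prefix test inside an
-- iterative prefix-stripping loop (objective: simpler; same return value everywhere).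

-- ===== PORT A =====
-- the module constant NON_APT_LIBRARIES, in insertion order
def nonAptLibraries : List (String × String) :=
  [("nix-flake-c", "nix"), ("nix-cmd-c", "nix"), ("nix-fetchers-c", "nix"),
   ("nix-main-c", "nix"), ("nix-store-c", "nix"), ("nix-expr-c", "nix"),
   ("nixflake", "nix"), ("nixcmd", "nix"), ("nixfetchers", "nix"),
   ("nixmainc", "nix"), ("nixstore", "nix"), ("nixexpr", "nix")]

-- hand port of str.rstrip('c') on List Char (PySem has no rstrip-with-chars): exact for a
-- single strip character — drop the trailing 'c's.
def rstripC (s : List Char) : List Char := (s.reverse.dropWhile (· == 'c')).reverse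

-- name.lower().replace('-','').replace('_','') on List Char
def aNormalize (s : List Char) : List Char :=
  PySem.Chars.replace (PySem.Chars.replace (PySem.Chars.lower s) ['-'] []) ['_'] []

-- the 'for lib_pattern, pkg_manager in NON_APT_LIBRARIES.items()' loop
def aLoop (normalized : List Char) : List (String × String) → Option String
  | [] => none
  | (pat, mgr) :: rest =>
      let patN := aNormalize pat.toList
      if normalized == patN || PySem.Chars.startswith normalized (rstripC patN) then some mgr
      else aLoop normalized rest

-- A's body, on the code-point list (recursion = the Python recursion on library_name[3:])
def aCore (cs : List Char) : Option String :=
  let normalized := aNormalize cs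
  match aLoop normalized nonAptLibraries with
  | some m => some m
  | none =>
      if h : PySem.Chars.startswith cs "lib".toList then aCore (cs.drop 3)
      else none
termination_by cs.length
decreasing_by
  have hp : "lib".toList <+: cs := (PySem.Chars.startswith_iff cs "lib".toList).mp h
  have : 3 ≤ cs.length := by simpa using hp.length_le
  simp [List.length_drop]; omega

def is_non_apt_library (library_name : String) : Option String :=
  aCore library_name.toList

-- ===== PORT B =====
def nixPrefixes : List String :=
  ["nixflake", "nixcmd", "nixfetchers", "nixmain", "nixstore", "nixexpr"]

-- B's while-loop: one current name, re-normalized each turn; tail recursion = the loop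
def bCore (cs : List Char) : Option String :=
  let normalized :=
    PySem.Chars.replace (PySem.Chars.replace (PySem.Chars.lower cs) ['-'] []) ['_'] []
  if nixPrefixes.any (fun p => PySem.Chars.startswith normalized p.toList) then some "nix"
  else if h : PySem.Chars.startswith cs "lib".toList then bCore (cs.drop 3)
  else none
termination_by cs.length
decreasing_by
  have hp : "lib".toList <+: cs := (PySem.Chars.startswith_iff cs "lib".toList).mp h
  have : 3 ≤ cs.length := by simpa using hp.length_le
  simp [List.length_drop]; omega

def is_non_apt_library_alt (library_name : String) : Option String :=
  bCore library_name.toList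

-- ===== PRECONDITION & SPEC =====
def Spec_is_non_apt_library (library_name : String) (out : Option String) : Prop := out = is_non_apt_library_alt library_name
instance (library_name : String) (out : Option String) : Decidable (Spec_is_non_apt_library library_name out) := by unfold Spec_is_non_apt_library; infer_instance

-- ===== CLAIM (what is proved, stated in full; the proofs are below) =====
def Claim_equal_is_non_apt_library : Prop := ∀ (library_name : String), Dom_is_non_apt_library library_name → Spec_is_non_apt_library library_name (is_non_apt_library library_name)

-- ===== LEMMAS AND PROOFS =====

-- if n equals a literal whose q-prefix test holds, the equality disjunct is subsumed
theorem eq_or_startswith {n p q : List Char} (hq : PySem.Chars.startswith p q = true) :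
    ((n == p) || PySem.Chars.startswith n q) = PySem.Chars.startswith n q := by
  by_cases h : n = p
  · subst h; simp [hq]
  · simp [h]

-- A's 12-entry table scan is exactly B's six-prefix test
theorem aLoop_eq (n : List Char) :
    aLoop n nonAptLibraries =
      (if nixPrefixes.any (fun p => PySem.Chars.startswith n p.toList) then some "nix" else none) := by
  simp only [aLoop, nonAptLibraries, nixPrefixes, List.any_cons, List.any_nil]
  rw [show aNormalize "nix-flake-c".toList = "nixflakec".toList from by decide,
      show aNormalize "nix-cmd-c".toList = "nixcmdc".toList from by decide,
      show aNormalize "nix-fetchers-c".toList = "nixfetchersc".toList from by decide,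
      show aNormalize "nix-main-c".toList = "nixmainc".toList from by decide,
      show aNormalize "nix-store-c".toList = "nixstorec".toList from by decide,
      show aNormalize "nix-expr-c".toList = "nixexprc".toList from by decide,
      show aNormalize "nixflake".toList = "nixflake".toList from by decide,
      show aNormalize "nixcmd".toList = "nixcmd".toList from by decide,
      show aNormalize "nixfetchers".toList = "nixfetchers".toList from by decide,
      show aNormalize "nixmainc".toList = "nixmainc".toList from by decide,
      show aNormalize "nixstore".toList = "nixstore".toList from by decide,
      show aNormalize "nixexpr".toList = "nixexpr".toList from by decide,
      show rstripC "nixflakec".toList = "nixflake".toList from by decide,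
      show rstripC "nixcmdc".toList = "nixcmd".toList from by decide,
      show rstripC "nixfetchersc".toList = "nixfetchers".toList from by decide,
      show rstripC "nixmainc".toList = "nixmain".toList from by decide,
      show rstripC "nixstorec".toList = "nixstore".toList from by decide,
      show rstripC "nixexprc".toList = "nixexpr".toList from by decide,
      show rstripC "nixflake".toList = "nixflake".toList from by decide,
      show rstripC "nixcmd".toList = "nixcmd".toList from by decide,
      show rstripC "nixfetchers".toList = "nixfetchers".toList from by decide,
      show rstripC "nixstore".toList = "nixstore".toList from by decide,
      show rstripC "nixexpr".toList = "nixexpr".toList from by decide,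
      eq_or_startswith (n := n) (by decide : PySem.Chars.startswith "nixflakec".toList "nixflake".toList = true),
      eq_or_startswith (n := n) (by decide : PySem.Chars.startswith "nixcmdc".toList "nixcmd".toList = true),
      eq_or_startswith (n := n) (by decide : PySem.Chars.startswith "nixfetchersc".toList "nixfetchers".toList = true),
      eq_or_startswith (n := n) (by decide : PySem.Chars.startswith "nixmainc".toList "nixmain".toList = true),
      eq_or_startswith (n := n) (by decide : PySem.Chars.startswith "nixstorec".toList "nixstore".toList = true),
      eq_or_startswith (n := n) (by decide : PySem.Chars.startswith "nixexprc".toList "nixexpr".toList = true),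
      eq_or_startswith (n := n) (by decide : PySem.Chars.startswith "nixflake".toList "nixflake".toList = true),
      eq_or_startswith (n := n) (by decide : PySem.Chars.startswith "nixcmd".toList "nixcmd".toList = true),
      eq_or_startswith (n := n) (by decide : PySem.Chars.startswith "nixfetchers".toList "nixfetchers".toList = true),
      eq_or_startswith (n := n) (by decide : PySem.Chars.startswith "nixstore".toList "nixstore".toList = true),
      eq_or_startswith (n := n) (by decide : PySem.Chars.startswith "nixexpr".toList "nixexpr".toList = true)]
  by_cases h1 : PySem.Chars.startswith n "nixflake".toList = true <;>
  by_cases h2 : PySem.Chars.startswith n "nixcmd".toList = true <;>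
  by_cases h3 : PySem.Chars.startswith n "nixfetchers".toList = true <;>
  by_cases h4 : PySem.Chars.startswith n "nixmain".toList = true <;>
  by_cases h5 : PySem.Chars.startswith n "nixstore".toList = true <;>
  by_cases h6 : PySem.Chars.startswith n "nixexpr".toList = true <;>
  (simp only [Bool.not_eq_true] at *) <;> simp only [h1, h2, h3, h4, h5, h6] <;> simp


theorem core_eq (cs : List Char) : aCore cs = bCore cs := by
  have H : ∀ n (cs : List Char), cs.length = n → aCore cs = bCore cs := by
    intro n
    induction n using Nat.strong_induction_on with
    | _ n ih =>
      intro cs hlen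
      rw [aCore, bCore, aLoop_eq]
      simp only [aNormalize]
      by_cases hA : (nixPrefixes.any fun p =>
          PySem.Chars.startswith
            (PySem.Chars.replace (PySem.Chars.replace (PySem.Chars.lower cs) ['-'] []) ['_'] [])
            p.toList) = true
      · rw [if_pos hA, if_pos hA]
      · rw [if_neg hA, if_neg hA]
        by_cases hL : PySem.Chars.startswith cs "lib".toList = true
        · have hp : "lib".toList <+: cs := (PySem.Chars.startswith_iff cs "lib".toList).mp hL
          have h3 : 3 ≤ cs.length := by simpa using hp.length_le
          rw [dif_pos hL, dif_pos hL]
          exact ih (cs.drop 3).length (by simp [List.length_drop]; omega) _ rfl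
        · rw [dif_neg hL, dif_neg hL]
  exact H cs.length cs rfl

-- ===== VERDICT (by name: the statement is the Claim_ definition above) =====
theorem is_non_apt_library_spec : Claim_equal_is_non_apt_library := by
  intro s _
  unfold Spec_is_non_apt_library is_non_apt_library is_non_apt_library_alt
  exact core_eq s.toList
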